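-- pv_equiv track=rewrite | github.com/kgs/aoc2022 | day22/solve.py | face_3d
-- ===== SOURCE A (Python) =====
-- def face_3d(x: int, y: int) -> tuple[int, tuple[int, int, int, int]]:
--     # x1, x2, y1, y2
--     # sentinels included!
--     faces = [
--         (9, 9 + 4, 1, 1 + 4),
--         (1, 1 + 4, 5, 5 + 4),
--         (5, 5 + 4, 5, 5 + 4),
--         (9, 9 + 4, 5, 5 + 4),
--         (9, 9 + 4, 9, 9 + 4),
--         (13, 13 + 4, 9, 9 + 4)
--     ]
--     for i, f in enumerate(faces):
--         x1, x2, y1, y2 = f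
--         if x1 <= x < x2 and y1 <= y < y2:
--             return i + 1, faces[i]
--     raise Exception("should not happen!")
-- ===== SOURCE B (Python) =====
-- def face_3d(x: int, y: int) -> tuple[int, tuple[int, int, int, int]]:
--     # x1, x2, y1, y2 (sentinels included, as in the original layout)
--     faces = [
--         (9, 13, 1, 5),
--         (1, 5, 5, 9),
--         (5, 9, 5, 9),
--         (9, 13, 5, 9),
--         (9, 13, 9, 13),
--         (13, 17, 9, 13),
--     ]
--     block = {(2, 0): 1, (0, 1): 2, (1, 1): 3, (2, 1): 4, (2, 2): 5, (3, 2): 6}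
--     num = block.get(((x - 1) // 4, (y - 1) // 4))
--     if num is None:
--         raise Exception("should not happen!")
--     return num, faces[num - 1]
-- ===== Notes on version B (the rewrite author's own statement) =====
-- stated objective: simpler
-- what changed: Replaces the linear scan over the six rectangles with arithmetic 4x4-block indices ((x-1)//4,(y-1)//4) and a single table lookup.
import Mathlib
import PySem

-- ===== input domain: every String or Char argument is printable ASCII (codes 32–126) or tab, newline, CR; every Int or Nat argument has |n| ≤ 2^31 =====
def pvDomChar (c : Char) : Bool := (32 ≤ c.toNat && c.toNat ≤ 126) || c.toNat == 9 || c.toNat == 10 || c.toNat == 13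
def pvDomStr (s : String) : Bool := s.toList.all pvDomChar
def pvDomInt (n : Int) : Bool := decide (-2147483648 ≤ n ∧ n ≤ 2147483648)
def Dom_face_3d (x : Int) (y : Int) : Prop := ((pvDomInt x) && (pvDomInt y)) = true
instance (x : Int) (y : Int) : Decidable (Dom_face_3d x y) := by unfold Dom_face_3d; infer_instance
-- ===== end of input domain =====

-- B replaces A's linear scan over six rectangles with arithmetic 4x4-block indices and one table lookup (objective: simpler).

-- ===== PORT A =====
-- A's faces list (sentinels included, as in the source)
def facesA : List (Int × Int × Int × Int) :=
  [(9, 13, 1, 5), (1, 5, 5, 9), (5, 9, 5, 9), (9, 13, 5, 9), (9, 13, 9, 13), (13, 17, 9, 13)]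

-- the 'for i, f in enumerate(faces)' loop with its early return; none = the final raise
def faceScanA (x y : Int) (i : Int) : List (Int × Int × Int × Int) → Option (Int × (Int × Int × Int × Int))
  | [] => none
  | f :: rest =>
    if f.1 ≤ x ∧ x < f.2.1 ∧ f.2.2.1 ≤ y ∧ y < f.2.2.2 then some (i + 1, f)
    else faceScanA x y (i + 1) rest

def face_3d (x : Int) (y : Int) : Int × (Int × Int × Int × Int) :=
  (faceScanA x y 0 facesA).getD (0, (0, 0, 0, 0))  -- default unreachable inside Pre_ (Python raises)

-- ===== PORT B =====
def facesB : List (Int × Int × Int × Int) :=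
  [(9, 13, 1, 5), (1, 5, 5, 9), (5, 9, 5, 9), (9, 13, 5, 9), (9, 13, 9, 13), (13, 17, 9, 13)]

def blockB : PySem.Dict (Int × Int) Int :=
  PySem.Dict.ofList [((2, 0), 1), ((0, 1), 2), ((1, 1), 3), ((2, 1), 4), ((2, 2), 5), ((3, 2), 6)]

def face_3d_alt (x : Int) (y : Int) : Int × (Int × Int × Int × Int) :=
  match blockB.get? (PySem.Int.floordiv (x - 1) 4, PySem.Int.floordiv (y - 1) 4) with
  | some n => (n, (PySem.List.pyGet? facesB (n - 1)).getD (0, 0, 0, 0))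
  | none => (0, (0, 0, 0, 0))  -- Python raises here (outside Pre_)

-- ===== PRECONDITION & SPEC =====
-- Pre_ = the union of the six face rectangles: exactly where A returns (elsewhere it raises Exception)
def Pre_face_3d (x : Int) (y : Int) : Prop :=
  (9 ≤ x ∧ x < 13 ∧ 1 ≤ y ∧ y < 5) ∨ (1 ≤ x ∧ x < 5 ∧ 5 ≤ y ∧ y < 9) ∨
  (5 ≤ x ∧ x < 9 ∧ 5 ≤ y ∧ y < 9) ∨ (9 ≤ x ∧ x < 13 ∧ 5 ≤ y ∧ y < 9) ∨
  (9 ≤ x ∧ x < 13 ∧ 9 ≤ y ∧ y < 13) ∨ (13 ≤ x ∧ x < 17 ∧ 9 ≤ y ∧ y < 13)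
instance (x : Int) (y : Int) : Decidable (Pre_face_3d x y) := by unfold Pre_face_3d; infer_instance

def pvWitness_face_3d : Int × Int := (10, 2)

def Spec_face_3d (x : Int) (y : Int) (out : Int × (Int × Int × Int × Int)) : Prop := out = face_3d_alt x y
instance (x : Int) (y : Int) (out : Int × (Int × Int × Int × Int)) : Decidable (Spec_face_3d x y out) := by unfold Spec_face_3d; infer_instance

-- ===== CLAIM (what is proved, stated in full; the proofs are below) =====
def Claim_equal_face_3d : Prop := ∀ (x : Int) (y : Int), Dom_face_3d x y → Pre_face_3d x y → Spec_face_3d x y (face_3d x y)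

-- ===== LEMMAS AND PROOFS =====
theorem fd4 (a q : Int) (h1 : q * 4 ≤ a) (h2 : a < (q + 1) * 4) : PySem.Int.floordiv a 4 = q := by
  rw [PySem.Int.floordiv_eq_iff_of_pos (by norm_num)]; omega

-- ===== VERDICT (by name: the statement is the Claim_ definition above) =====
theorem face_3d_spec : Claim_equal_face_3d := by
  intro x y _ hp
  unfold Spec_face_3d
  rcases hp with ⟨h1, h2, h3, h4⟩ | ⟨h1, h2, h3, h4⟩ | ⟨h1, h2, h3, h4⟩ | ⟨h1, h2, h3, h4⟩ |
    ⟨h1, h2, h3, h4⟩ | ⟨h1, h2, h3, h4⟩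
  · have hc : PySem.Int.floordiv (x - 1) 4 = 2 := fd4 _ 2 (by omega) (by omega)
    have hr : PySem.Int.floordiv (y - 1) 4 = 0 := fd4 _ 0 (by omega) (by omega)
    have hB : face_3d_alt x y = (1, (9, 13, 1, 5)) := by
      simp only [face_3d_alt, hc, hr]; decide
    have hA : face_3d x y = (1, (9, 13, 1, 5)) := by
      simp only [face_3d, facesA, faceScanA]
      split_ifs <;> first | rfl | omega
    rw [hA, hB]
  · have hc : PySem.Int.floordiv (x - 1) 4 = 0 := fd4 _ 0 (by omega) (by omega)
    have hr : PySem.Int.floordiv (y - 1) 4 = 1 := fd4 _ 1 (by omega) (by omega)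
    have hB : face_3d_alt x y = (2, (1, 5, 5, 9)) := by
      simp only [face_3d_alt, hc, hr]; decide
    have hA : face_3d x y = (2, (1, 5, 5, 9)) := by
      simp only [face_3d, facesA, faceScanA]
      split_ifs <;> first | rfl | omega
    rw [hA, hB]
  · have hc : PySem.Int.floordiv (x - 1) 4 = 1 := fd4 _ 1 (by omega) (by omega)
    have hr : PySem.Int.floordiv (y - 1) 4 = 1 := fd4 _ 1 (by omega) (by omega)
    have hB : face_3d_alt x y = (3, (5, 9, 5, 9)) := by
      simp only [face_3d_alt, hc, hr]; decide
    have hA : face_3d x y = (3, (5, 9, 5, 9)) := by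
      simp only [face_3d, facesA, faceScanA]
      split_ifs <;> first | rfl | omega
    rw [hA, hB]
  · have hc : PySem.Int.floordiv (x - 1) 4 = 2 := fd4 _ 2 (by omega) (by omega)
    have hr : PySem.Int.floordiv (y - 1) 4 = 1 := fd4 _ 1 (by omega) (by omega)
    have hB : face_3d_alt x y = (4, (9, 13, 5, 9)) := by
      simp only [face_3d_alt, hc, hr]; decide
    have hA : face_3d x y = (4, (9, 13, 5, 9)) := by
      simp only [face_3d, facesA, faceScanA]
      split_ifs <;> first | rfl | omega
    rw [hA, hB]
  · have hc : PySem.Int.floordiv (x - 1) 4 = 2 := fd4 _ 2 (by omega) (by omega)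
    have hr : PySem.Int.floordiv (y - 1) 4 = 2 := fd4 _ 2 (by omega) (by omega)
    have hB : face_3d_alt x y = (5, (9, 13, 9, 13)) := by
      simp only [face_3d_alt, hc, hr]; decide
    have hA : face_3d x y = (5, (9, 13, 9, 13)) := by
      simp only [face_3d, facesA, faceScanA]
      split_ifs <;> first | rfl | omega
    rw [hA, hB]
  · have hc : PySem.Int.floordiv (x - 1) 4 = 3 := fd4 _ 3 (by omega) (by omega)
    have hr : PySem.Int.floordiv (y - 1) 4 = 2 := fd4 _ 2 (by omega) (by omega)
    have hB : face_3d_alt x y = (6, (13, 17, 9, 13)) := by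
      simp only [face_3d_alt, hc, hr]; decide
    have hA : face_3d x y = (6, (13, 17, 9, 13)) := by
      simp only [face_3d, facesA, faceScanA]
      split_ifs <;> first | rfl | omega
    rw [hA, hB]
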